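-- pv_equiv track=rewrite | github.com/SilvestreBartolomeu/Aulas-Python | exercicio6.py | matriz_borda_crescente
-- ===== SOURCE A (Python) =====
-- def matriz_borda_crescente(linhas, comprimento):
--   matriz = list()
--
--   for i in range(linhas):
--     linha = list()
--     for j in range(i, comprimento + i):
--       linha.append(j)
--     matriz.append(linha)
--   return matriz
-- ===== SOURCE B (Python) =====
-- def matriz_borda_crescente(linhas, comprimento):
--     if linhas <= 0:
--         return []
--     cur = list(range(comprimento))
--     matriz = [cur]
--     for _ in range(linhas - 1):
--         cur = [x + 1 for x in cur]
--         matriz.append(cur)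
--     return matriz
-- ===== Notes on version B (the rewrite author's own statement) =====
-- stated objective: alternative
-- what changed: B computes the first row once and derives each subsequent row from its predecessor by adding 1 to every element, instead of rebuilding each row independently from range(i, comprimento+i).
import Mathlib
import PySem

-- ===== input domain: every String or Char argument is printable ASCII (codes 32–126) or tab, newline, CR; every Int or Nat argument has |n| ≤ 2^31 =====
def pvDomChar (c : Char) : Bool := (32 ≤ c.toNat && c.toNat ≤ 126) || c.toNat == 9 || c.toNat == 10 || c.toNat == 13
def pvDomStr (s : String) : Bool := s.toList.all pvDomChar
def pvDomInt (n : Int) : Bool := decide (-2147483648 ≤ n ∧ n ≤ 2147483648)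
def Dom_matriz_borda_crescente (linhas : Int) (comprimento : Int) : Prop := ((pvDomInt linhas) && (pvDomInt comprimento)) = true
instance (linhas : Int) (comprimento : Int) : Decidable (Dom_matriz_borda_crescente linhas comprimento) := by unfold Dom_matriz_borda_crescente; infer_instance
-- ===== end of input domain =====

-- B derives each row from its predecessor by +1 instead of recomputing range(i, comprimento+i); alternative decomposition, same cost.


-- ===== PORT A =====
-- for i in range(linhas): linha = []; for j in range(i, comprimento+i): linha.append(j); matriz.append(linha)
def matriz_borda_crescente (linhas : Int) (comprimento : Int) : List (List Int) :=
  (PySem.List.pyRange 0 linhas 1).foldl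
    (fun matriz i =>
      matriz ++ [(PySem.List.pyRange i (comprimento + i) 1).foldl (fun linha j => linha ++ [j]) []])
    []

-- ===== PORT B =====
-- for _ in range(linhas-1): cur = [x+1 for x in cur]; matriz.append(cur)
def pvBLoop : Nat → List Int → List (List Int) → List (List Int)
  | 0, _, matriz => matriz
  | n + 1, cur, matriz =>
      let cur' := cur.map (fun x => x + 1)
      pvBLoop n cur' (matriz ++ [cur'])

def matriz_borda_crescente_alt (linhas : Int) (comprimento : Int) : List (List Int) :=
  if linhas ≤ 0 then []
  else
    let cur := PySem.List.pyRange 0 comprimento 1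
    pvBLoop (linhas - 1).toNat cur [cur]

-- ===== PRECONDITION & SPEC =====
def Spec_matriz_borda_crescente (linhas : Int) (comprimento : Int) (out : List (List Int)) : Prop := out = matriz_borda_crescente_alt linhas comprimento
instance (linhas : Int) (comprimento : Int) (out : List (List Int)) : Decidable (Spec_matriz_borda_crescente linhas comprimento out) := by unfold Spec_matriz_borda_crescente; infer_instance

-- ===== CLAIM (what is proved, stated in full; the proofs are below) =====
def Claim_equal_matriz_borda_crescente : Prop := ∀ (linhas : Int) (comprimento : Int), Dom_matriz_borda_crescente linhas comprimento → Spec_matriz_borda_crescente linhas comprimento (matriz_borda_crescente linhas comprimento)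

-- ===== LEMMAS AND PROOFS =====

theorem pvFoldlAppendId (xs : List Int) (init : List Int) :
    xs.foldl (fun acc j => acc ++ [j]) init = init ++ xs := by
  induction xs generalizing init with
  | nil => simp
  | cons x xs ih => simp [List.foldl_cons, ih]

theorem pvFoldlSnoc (f : Int → List Int) (xs : List Int) (init : List (List Int)) :
    xs.foldl (fun m i => m ++ [f i]) init = init ++ xs.map f := by
  induction xs generalizing init with
  | nil => simp
  | cons x xs ih => simp [List.foldl_cons, ih]

-- A in closed form: one row per i in range(linhas)
theorem pvA_closed (l c : Int) :
    matriz_borda_crescente l c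
      = (PySem.List.pyRange 0 l 1).map (fun i => PySem.List.pyRange i (c + i) 1) := by
  unfold matriz_borda_crescente
  rw [pvFoldlSnoc]
  rw [List.nil_append]
  apply List.map_congr_left
  intro i _
  rw [pvFoldlAppendId, List.nil_append]

-- B's loop in closed form
theorem pvBLoop_closed (n : Nat) (cur : List Int) (acc : List (List Int)) :
    pvBLoop n cur acc
      = acc ++ (List.range n).map (fun (k : Nat) => cur.map (fun x => x + (k + 1 : Int))) := by
  induction n generalizing cur acc with
  | zero => simp [pvBLoop]
  | succ n ih =>
      show pvBLoop n (cur.map (fun x => x + 1)) (acc ++ [cur.map (fun x => x + 1)]) = _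
      rw [ih]
      rw [List.range_succ_eq_map, List.map_cons, List.map_map, List.append_assoc,
        List.singleton_append]
      refine congrArg (acc ++ ·) ?_
      refine List.cons_eq_cons.mpr ⟨?_, ?_⟩
      · apply List.map_congr_left
        intro x _
        norm_num
      · apply List.map_congr_left
        intro k _
        simp only [Function.comp_apply, List.map_map]
        apply List.map_congr_left
        intro x _
        simp only [Function.comp_apply]
        push_cast
        ring

-- shifting a range: range(a, c+a) = [x + a for x in range(0, c)]
theorem pvRange_shift (c a : Int) :
    PySem.List.pyRange a (c + a) 1
      = (PySem.List.pyRange 0 c 1).map (fun x => x + a) := by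
  rw [PySem.List.pyRange_one, PySem.List.pyRange_one]
  have h : (c + a - a).toNat = (c - 0).toNat := by omega
  rw [h, List.map_map]
  apply List.map_congr_left
  intro j _
  simp only [Function.comp_apply]
  ring

-- ===== VERDICT (by name: the statement is the Claim_ definition above) =====
theorem matriz_borda_crescente_spec : Claim_equal_matriz_borda_crescente := by
  intro l c _
  unfold Spec_matriz_borda_crescente matriz_borda_crescente_alt
  by_cases hl : l ≤ 0
  · rw [if_pos hl, pvA_closed, PySem.List.pyRange_one_eq_nil hl, List.map_nil]
  · rw [if_neg hl, pvBLoop_closed, pvA_closed]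
    have h0l : (0 : Int) < l := by omega
    rw [PySem.List.pyRange_one_cons h0l, List.map_cons, List.singleton_append]
    congr 1
    · rw [add_zero]
    · rw [PySem.List.pyRange_one, List.map_map]
      have hn : (l - (0 + 1)).toNat = (l - 1).toNat := by norm_num
      rw [hn]
      apply List.map_congr_left
      intro k _
      simp only [Function.comp_apply]
      rw [pvRange_shift]
      apply List.map_congr_left
      intro x _
      push_cast
      ring
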